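-- pv_equiv track=rewrite | github.com/vincent-kk/Basic-Algorithm | 3. DP/problem-9465.py | takeStiker
-- ===== SOURCE A (Python) =====
-- from typing import List
--
-- def takeStiker(input_array: List[List[int]]):
--     upper_max = input_array[0][0]
--     under_max = input_array[0][1]
--     skip_max = 0
--     for up, down in input_array[1:]:
--         upper_max, under_max, skip_max = (
--             max(under_max + up, skip_max + up),
--             max(upper_max + down, skip_max + down),
--             max(upper_max, under_max),
--         )
--
--     return max(upper_max, under_max, skip_max)
-- ===== SOURCE B (Python) =====
-- def takeStiker(input_array):
--     # Tropical (max-plus) linear algebra reformulation: each column after the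
--     # first is a 3x3 transition matrix over max-plus (None = -infinity); the
--     # matrices are multiplied up left to right and the product is applied once
--     # to the initial state vector built from column 0.
--     def omax(a, b):
--         if a is None:
--             return b
--         if b is None:
--             return a
--         return a if a >= b else b
--
--     def oadd(a, b):
--         return None if a is None or b is None else a + b
--
--     def mul(M, N):
--         return [[omax(omax(oadd(M[i][0], N[0][j]), oadd(M[i][1], N[1][j])),
--                       oadd(M[i][2], N[2][j])) for j in range(3)]
--                 for i in range(3)]
--
--     P = [[0 if i == j else None for j in range(3)] for i in range(3)]
--     for up, down in input_array[1:]: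
--         P = mul([[None, up, up], [down, None, down], [0, 0, None]], P)
--     v = [input_array[0][0], input_array[0][1], 0]
--     r = [omax(omax(oadd(row[0], v[0]), oadd(row[1], v[1])), oadd(row[2], v[2]))
--          for row in P]
--     return max(r[0], r[1], r[2])
-- ===== Notes on version B (the rewrite author's own statement) =====
-- stated objective: alternative
-- what changed: Reformulates the DP as max-plus (tropical) linear algebra: every column after the first becomes a 3x3 transition matrix (None = -infinity), the matrices are multiplied up left to right, and the resulting product matrix is applied once to the initial state vector from column 0.
-- outside the precondition, e.g. on takeStiker([]): A raises IndexError, B raises IndexError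
import Mathlib
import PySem

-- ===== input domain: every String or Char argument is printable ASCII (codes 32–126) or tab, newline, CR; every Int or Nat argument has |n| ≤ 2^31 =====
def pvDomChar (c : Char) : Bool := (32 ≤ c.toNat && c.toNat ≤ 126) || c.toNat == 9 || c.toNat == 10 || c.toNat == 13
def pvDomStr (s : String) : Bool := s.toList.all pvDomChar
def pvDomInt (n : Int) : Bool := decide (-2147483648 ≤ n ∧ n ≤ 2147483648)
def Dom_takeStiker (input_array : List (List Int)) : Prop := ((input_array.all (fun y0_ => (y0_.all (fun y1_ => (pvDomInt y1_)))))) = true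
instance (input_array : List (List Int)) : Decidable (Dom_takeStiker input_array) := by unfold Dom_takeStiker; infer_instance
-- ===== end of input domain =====

-- B recasts A's rolling three-state DP as a fold of 3x3 max-plus transition matrices
-- applied once to the initial state vector; return values only, no side effects.

-- ===== PORT A =====
-- A's loop state: (upper_max, under_max, skip_max)
def takeStikerStepA (st : Int × Int × Int) (row : List Int) : Int × Int × Int :=
  let up := (PySem.List.pyGet? row 0).getD 0
  let down := (PySem.List.pyGet? row 1).getD 0
  (max (st.2.1 + up) (st.2.2 + up), max (st.1 + down) (st.2.2 + down), max st.1 st.2.1)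

def takeStiker (input_array : List (List Int)) : Int :=
  match input_array with
  | [] => 0  -- Python raises IndexError here; excluded by Pre_takeStiker
  | row0 :: rest =>
    let upper0 := (PySem.List.pyGet? row0 0).getD 0
    let under0 := (PySem.List.pyGet? row0 1).getD 0
    let st := rest.foldl takeStikerStepA (upper0, under0, 0)
    max (max st.1 st.2.1) st.2.2

-- ===== PORT B =====
-- Source B's max-plus helpers: None = -infinity, modelled by Option Int = none.
def omaxO : Option Int → Option Int → Option Int
  | none, b => b
  | some a, none => some a
  | some a, some b => some (max a b)   -- Python's `a if a >= b else b`

def oaddO : Option Int → Option Int → Option Int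
  | none, _ => none
  | _, none => none
  | some a, some b => some (a + b)

abbrev VecO := Option Int × Option Int × Option Int
abbrev MatO := VecO × VecO × VecO   -- three rows

-- one inner-product term of Source B's `mul` / final application
def rowDotO (r v : VecO) : Option Int :=
  omaxO (omaxO (oaddO r.1 v.1) (oaddO r.2.1 v.2.1)) (oaddO r.2.2 v.2.2)

def matColO (N : MatO) (j : Fin 3) : VecO :=
  match j with
  | 0 => (N.1.1, N.2.1.1, N.2.2.1)
  | 1 => (N.1.2.1, N.2.1.2.1, N.2.2.2.1)
  | 2 => (N.1.2.2, N.2.1.2.2, N.2.2.2.2)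

def mulRowO (r : VecO) (N : MatO) : VecO :=
  (rowDotO r (matColO N 0), rowDotO r (matColO N 1), rowDotO r (matColO N 2))

def mulMatO (M N : MatO) : MatO :=
  (mulRowO M.1 N, mulRowO M.2.1 N, mulRowO M.2.2 N)

def mulVecO (M : MatO) (v : VecO) : VecO :=
  (rowDotO M.1 v, rowDotO M.2.1 v, rowDotO M.2.2 v)

-- the per-column transition matrix [[None,up,up],[down,None,down],[0,0,None]]
def colMatO (row : List Int) : MatO :=
  let up := (PySem.List.pyGet? row 0).getD 0
  let down := (PySem.List.pyGet? row 1).getD 0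
  ((none, some up, some up), (some down, none, some down), (some 0, some 0, none))

def idMatO : MatO :=
  ((some 0, none, none), (none, some 0, none), (none, none, some 0))

def takeStiker_alt (input_array : List (List Int)) : Int :=
  match input_array with
  | [] => 0  -- Python raises IndexError here; excluded by Pre_takeStiker
  | row0 :: rest =>
    let P := rest.foldl (fun P row => mulMatO (colMatO row) P) idMatO
    let u0 := (PySem.List.pyGet? row0 0).getD 0
    let d0 := (PySem.List.pyGet? row0 1).getD 0
    let r := mulVecO P (some u0, some d0, some 0)
    -- Python's final max over three ints; the entries are provably `some`, getD 0 only totalizes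
    max (max (r.1.getD 0) (r.2.1.getD 0)) (r.2.2.getD 0)

-- ===== PRECONDITION & SPEC =====
-- Exactly the inputs where Python A returns: A indexes row 0 at [0] and [1] and unpacks
-- every later row into two values, so it raises on [] / a short first row / a later row ≠ 2 long.
def Pre_takeStiker (input_array : List (List Int)) : Prop :=
  input_array ≠ [] ∧ 2 ≤ input_array.headI.length ∧ ∀ r ∈ input_array.tail, r.length = 2
instance (input_array : List (List Int)) : Decidable (Pre_takeStiker input_array) := by
  unfold Pre_takeStiker; infer_instance
def pvWitness_takeStiker : List (List Int) := [[1, 2], [3, 4]]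

def Spec_takeStiker (input_array : List (List Int)) (out : Int) : Prop := out = takeStiker_alt input_array
instance (input_array : List (List Int)) (out : Int) : Decidable (Spec_takeStiker input_array out) := by unfold Spec_takeStiker; infer_instance

-- ===== CLAIM (what is proved, stated in full; the proofs are below) =====
def Claim_equal_takeStiker : Prop := ∀ (input_array : List (List Int)), Dom_takeStiker input_array → Pre_takeStiker input_array → Spec_takeStiker input_array (takeStiker input_array)

-- ===== LEMMAS AND PROOFS =====

theorem omaxO_comm (a b : Option Int) : omaxO a b = omaxO b a := by
  cases a <;> cases b <;> simp [omaxO, max_comm]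

theorem omaxO_assoc (a b c : Option Int) : omaxO (omaxO a b) c = omaxO a (omaxO b c) := by
  cases a <;> cases b <;> cases c <;> simp [omaxO, max_assoc]

theorem omaxO_left_comm (a b c : Option Int) : omaxO a (omaxO b c) = omaxO b (omaxO a c) := by
  rw [← omaxO_assoc, omaxO_comm a b, omaxO_assoc]

theorem oaddO_assoc (a b c : Option Int) : oaddO (oaddO a b) c = oaddO a (oaddO b c) := by
  cases a <;> cases b <;> cases c <;> simp [oaddO, add_assoc]

theorem oaddO_omaxO_left (a b c : Option Int) :
    oaddO a (omaxO b c) = omaxO (oaddO a b) (oaddO a c) := by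
  cases a <;> cases b <;> cases c <;> simp [oaddO, omaxO, max_add_add_left]

theorem oaddO_omaxO_right (a b c : Option Int) :
    oaddO (omaxO a b) c = omaxO (oaddO a c) (oaddO b c) := by
  cases a <;> cases b <;> cases c <;> simp [oaddO, omaxO, max_add_add_right]

-- max-plus associativity, vector form: (M·N)·v = M·(N·v), one row at a time
theorem rowDotO_mulRowO (r : VecO) (N : MatO) (v : VecO) :
    rowDotO (mulRowO r N) v = rowDotO r (mulVecO N v) := by
  obtain ⟨a, b, c⟩ := r
  obtain ⟨⟨n11, n12, n13⟩, ⟨n21, n22, n23⟩, n31, n32, n33⟩ := N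
  obtain ⟨x, y, z⟩ := v
  simp only [mulRowO, mulVecO, rowDotO, matColO]
  simp only [oaddO_omaxO_right, oaddO_omaxO_left, oaddO_assoc]
  simp only [omaxO_comm, omaxO_left_comm]

theorem mulVecO_mulMatO (M N : MatO) (v : VecO) :
    mulVecO (mulMatO M N) v = mulVecO M (mulVecO N v) := by
  obtain ⟨r1, r2, r3⟩ := M
  simp only [mulMatO, mulVecO, rowDotO_mulRowO]

-- applying a column matrix to an all-`some` vector is exactly A's DP step
theorem mulVecO_colMatO (row : List Int) (u d s : Int) :
    mulVecO (colMatO row) (some u, some d, some s) =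
      (some (takeStikerStepA (u, d, s) row).1,
       some (takeStikerStepA (u, d, s) row).2.1,
       some (takeStikerStepA (u, d, s) row).2.2) := by
  simp [mulVecO, colMatO, takeStikerStepA, rowDotO, oaddO, omaxO, add_comm]

theorem mulVecO_idMatO (u d s : Int) :
    mulVecO idMatO (some u, some d, some s) = (some u, some d, some s) := by
  simp [mulVecO, idMatO, rowDotO, oaddO, omaxO]

-- fold of matrices applied to a vector = fold of the matrix applications on the vector
theorem fold_assoc (rows : List (List Int)) (P : MatO) (v : VecO) :
    mulVecO (rows.foldl (fun Q row => mulMatO (colMatO row) Q) P) v =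
      rows.foldl (fun w row => mulVecO (colMatO row) w) (mulVecO P v) := by
  induction rows generalizing P with
  | nil => rfl
  | cons r rs ih =>
    simp only [List.foldl_cons]
    rw [ih, mulVecO_mulMatO]

-- fold of matrix applications on an all-`some` vector = A's DP fold
theorem fold_vec_step (rows : List (List Int)) (u d s : Int) :
    rows.foldl (fun w row => mulVecO (colMatO row) w) (some u, some d, some s) =
      (fun st : Int × Int × Int => (some st.1, some st.2.1, some st.2.2))
        (rows.foldl takeStikerStepA (u, d, s)) := by
  induction rows generalizing u d s with
  | nil => rfl
  | cons r rs ih =>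
    simp only [List.foldl_cons]
    rw [mulVecO_colMatO, ih]

-- ===== VERDICT (by name: the statement is the Claim_ definition above) =====
theorem takeStiker_spec : Claim_equal_takeStiker := by
  intro input_array _ _
  unfold Spec_takeStiker
  cases input_array with
  | nil => rfl
  | cons row0 rest =>
    simp only [takeStiker, takeStiker_alt]
    rw [fold_assoc, mulVecO_idMatO, fold_vec_step]
    simp
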